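-- pv_equiv track=rewrite | github.com/Certseeds/CS303_AI | Ass1_Gomoku/Gomoku_fifth.py | get_death
-- ===== SOURCE A (Python) =====
-- def get_death(array, color):
--     """
--     :return: (death_four,death_three,death_two)
--     -15.-10,-5(我觉得应该更低一点)
--     """
--     death_four = 0
--     death_three = 0
--     death_two = 0
--     for j in range(0, len(array) - 3):
--         if array[j] == color * -1 and array[j + 1] == color and array[j + 2] == color and array[j + 3] == color * -1:
--             death_two += 1
--     for j in range(0, len(array) - 4):
--         if array[j] == color * -1 and array[j + 1] == color and array[j + 2] == color and array[j + 3] == color and array[j + 4] == color * -1: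
--             death_three += 1
--     for j in range(0, len(array) - 5):
--         if array[j] == color * -1 and array[j + 1] == color and array[j + 2] == color and array[j + 3] == color and array[j + 4] == color and array[
--             j + 5] == color * -1:
--             death_two += 1
--     return death_four, death_three, death_two
-- ===== SOURCE B (Python) =====
-- def get_death(array, color):
--     """
--     :return: (death_four,death_three,death_two)
--     One left-to-right pass over maximal runs of `color` bounded by opponent stones.
--     """
--     opp = -color
--     death_three = 0
--     death_two = 0
--     n = len(array)
--     i = 0
--     while i < n:
--         if array[i] == color:
--             start = i
--             while i < n and array[i] == color:
--                 i += 1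
--             if start > 0 and i < n and array[start - 1] == opp and array[i] == opp:
--                 length = i - start
--                 if length == 2:
--                     death_two += 1
--                 elif length == 3:
--                     death_three += 1
--                 elif length == 4:
--                     death_two += 1
--         else:
--             i += 1
--     return 0, death_three, death_two
-- ===== Notes on version B (the rewrite author's own statement) =====
-- stated objective: alternative
-- what changed: A scans the array three times with overlapping 4/5/6-cell index windows; B makes one left-to-right pass that groups maximal runs of `color` and classifies each opponent-bounded run by its length (2/3/4).
-- outside the precondition, e.g. on get_death([0, 0, 0, 0], 0): A returns (0, 0, 1), B returns (0, 0, 0)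
import Mathlib
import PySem

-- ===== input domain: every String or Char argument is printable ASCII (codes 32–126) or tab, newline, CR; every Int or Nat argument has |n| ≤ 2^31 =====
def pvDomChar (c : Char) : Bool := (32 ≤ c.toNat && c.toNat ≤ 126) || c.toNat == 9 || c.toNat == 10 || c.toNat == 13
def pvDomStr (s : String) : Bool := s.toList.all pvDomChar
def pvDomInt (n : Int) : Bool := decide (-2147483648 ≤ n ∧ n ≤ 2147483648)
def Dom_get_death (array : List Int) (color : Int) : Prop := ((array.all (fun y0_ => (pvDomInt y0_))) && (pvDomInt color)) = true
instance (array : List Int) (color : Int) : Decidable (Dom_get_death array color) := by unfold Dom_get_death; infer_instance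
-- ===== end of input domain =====

-- B replaces A's three separate index-window scans by one left-to-right pass over the maximal
-- runs of `color` bounded by opponent stones (objective: alternative single-pass algorithm).

-- ===== PORT A =====
def get_death (array : List Int) (color : Int) : Int × Int × Int :=
  let death_four : Int := 0
  let death_two : Int :=
    (PySem.List.pyRange 0 ((array.length : Int) - 3) 1).foldl
      (fun acc j =>
        if PySem.List.pyGetD array j 0 = color * -1 ∧ PySem.List.pyGetD array (j+1) 0 = color ∧
           PySem.List.pyGetD array (j+2) 0 = color ∧ PySem.List.pyGetD array (j+3) 0 = color * -1
        then acc + 1 else acc) 0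
  let death_three : Int :=
    (PySem.List.pyRange 0 ((array.length : Int) - 4) 1).foldl
      (fun acc j =>
        if PySem.List.pyGetD array j 0 = color * -1 ∧ PySem.List.pyGetD array (j+1) 0 = color ∧
           PySem.List.pyGetD array (j+2) 0 = color ∧ PySem.List.pyGetD array (j+3) 0 = color ∧
           PySem.List.pyGetD array (j+4) 0 = color * -1
        then acc + 1 else acc) 0
  let death_two : Int :=
    (PySem.List.pyRange 0 ((array.length : Int) - 5) 1).foldl
      (fun acc j =>
        if PySem.List.pyGetD array j 0 = color * -1 ∧ PySem.List.pyGetD array (j+1) 0 = color ∧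
           PySem.List.pyGetD array (j+2) 0 = color ∧ PySem.List.pyGetD array (j+3) 0 = color ∧
           PySem.List.pyGetD array (j+4) 0 = color ∧ PySem.List.pyGetD array (j+5) 0 = color * -1
        then acc + 1 else acc) death_two
  (death_four, death_three, death_two)

-- ===== PORT B =====
-- run scanner: returns (death_three, death_two); `prev` is the cell just before the unprocessed tail
def goRuns (c o : Int) (prev : Option Int) (l : List Int) : Int × Int :=
  match l with
  | [] => (0, 0)
  | x :: xs =>
    if x = c then
      let run := xs.takeWhile (· = c)
      let rest := xs.dropWhile (· = c)
      let L : Int := 1 + run.length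
      let p := goRuns c o (some c) rest
      ((if (prev = some o ∧ rest.head? = some o) ∧ L = 3 then p.1 + 1 else p.1),
       (if (prev = some o ∧ rest.head? = some o) ∧ (L = 2 ∨ L = 4) then p.2 + 1 else p.2))
    else goRuns c o (some x) xs
termination_by l.length
decreasing_by
  · simpa using Nat.lt_succ_of_le (List.length_dropWhile_le (· = c) xs)
  · simp


def get_death_alt (array : List Int) (color : Int) : Int × Int × Int :=
  let p := goRuns color (-color) none array
  (0, p.1, p.2)

-- ===== PRECONDITION & SPEC =====
-- Pre_ restricts to the game's natural domain color ≠ 0 (stones are ±1): with color == 0 A's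
-- "patterns" are overlapping windows of empty cells bounded by empty cells, an accident of the
-- window scan that a run decomposition has no reason to reproduce.
def Pre_get_death (array : List Int) (color : Int) : Prop := color ≠ 0
instance (array : List Int) (color : Int) : Decidable (Pre_get_death array color) := by unfold Pre_get_death; infer_instance
def pvWitness_get_death : List Int × Int := ([-1, 1, 1, -1, 1, 1, 1, -1, 0], 1)
def Spec_get_death (array : List Int) (color : Int) (out : Int × Int × Int) : Prop := out = get_death_alt array color
instance (array : List Int) (color : Int) (out : Int × Int × Int) : Decidable (Spec_get_death array color out) := by unfold Spec_get_death; infer_instance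

-- ===== CLAIM (what is proved, stated in full; the proofs are below) =====
def Claim_equal_get_death : Prop := ∀ (array : List Int) (color : Int), Dom_get_death array color → Pre_get_death array color → Spec_get_death array color (get_death array color)

-- ===== LEMMAS AND PROOFS =====

-- occurrence indicators and counters for the three window patterns o,c,…,c,o
def ind4 (o c : Int) : List Int → Int
  | a :: b :: e :: d :: _ => if a = o ∧ b = c ∧ e = c ∧ d = o then 1 else 0
  | _ => 0
def ind5 (o c : Int) : List Int → Int
  | a :: b :: e :: f :: d :: _ => if a = o ∧ b = c ∧ e = c ∧ f = c ∧ d = o then 1 else 0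
  | _ => 0
def ind6 (o c : Int) : List Int → Int
  | a :: b :: e :: f :: g :: d :: _ => if a = o ∧ b = c ∧ e = c ∧ f = c ∧ g = c ∧ d = o then 1 else 0
  | _ => 0
def cnt4 (o c : Int) : List Int → Int
  | [] => 0
  | x :: xs => ind4 o c (x :: xs) + cnt4 o c xs
def cnt5 (o c : Int) : List Int → Int
  | [] => 0
  | x :: xs => ind5 o c (x :: xs) + cnt5 o c xs
def cnt6 (o c : Int) : List Int → Int
  | [] => 0
  | x :: xs => ind6 o c (x :: xs) + cnt6 o c xs

def pext (prev : Option Int) (l : List Int) : List Int :=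
  match prev with
  | none => l
  | some v => v :: l

lemma head?_dropWhile_false (p : Int → Bool) (l : List Int) (x : Int)
    (h : (l.dropWhile p).head? = some x) : p x = false := by
  induction l with
  | nil => simp at h
  | cons y t ih =>
    rw [List.dropWhile_cons] at h
    by_cases hp : p y = true
    · simp [hp] at h; exact ih h
    · simp [hp] at h; subst h; simpa using hp

lemma ind4_head_ne (o c x : Int) (t : List Int) (hx : x ≠ o) : ind4 o c (x :: t) = 0 := by
  rcases t with _ | ⟨a, _ | ⟨b, _ | ⟨d, t⟩⟩⟩ <;> simp [ind4, hx]
lemma ind5_head_ne (o c x : Int) (t : List Int) (hx : x ≠ o) : ind5 o c (x :: t) = 0 := by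
  rcases t with _ | ⟨a, _ | ⟨b, _ | ⟨d, _ | ⟨e, t⟩⟩⟩⟩ <;> simp [ind5, hx]
lemma ind6_head_ne (o c x : Int) (t : List Int) (hx : x ≠ o) : ind6 o c (x :: t) = 0 := by
  rcases t with _ | ⟨a, _ | ⟨b, _ | ⟨d, _ | ⟨e, _ | ⟨f, t⟩⟩⟩⟩⟩ <;> simp [ind6, hx]

lemma ind4_snd_ne (o c v x : Int) (t : List Int) (hx : x ≠ c) : ind4 o c (v :: x :: t) = 0 := by
  rcases t with _ | ⟨a, _ | ⟨b, t⟩⟩ <;> simp [ind4, hx]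
lemma ind5_snd_ne (o c v x : Int) (t : List Int) (hx : x ≠ c) : ind5 o c (v :: x :: t) = 0 := by
  rcases t with _ | ⟨a, _ | ⟨b, _ | ⟨d, t⟩⟩⟩ <;> simp [ind5, hx]
lemma ind6_snd_ne (o c v x : Int) (t : List Int) (hx : x ≠ c) : ind6 o c (v :: x :: t) = 0 := by
  rcases t with _ | ⟨a, _ | ⟨b, _ | ⟨d, _ | ⟨e, t⟩⟩⟩⟩ <;> simp [ind6, hx]

lemma cnt4_peel (o c : Int) (hco : c ≠ o) :
    ∀ run rest : List Int, (∀ y ∈ run, y = c) → cnt4 o c (run ++ rest) = cnt4 o c rest := by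
  intro run
  induction run with
  | nil => simp
  | cons y run ih =>
    intro rest hy
    rw [hy y (by simp), List.cons_append, show cnt4 o c (c :: (run ++ rest)) = ind4 o c (c :: (run ++ rest)) + cnt4 o c (run ++ rest) from rfl,
      ind4_head_ne _ _ _ _ hco, ih rest (fun z hz => hy z (by simp [hz]))]
    ring
lemma cnt5_peel (o c : Int) (hco : c ≠ o) :
    ∀ run rest : List Int, (∀ y ∈ run, y = c) → cnt5 o c (run ++ rest) = cnt5 o c rest := by
  intro run
  induction run with
  | nil => simp
  | cons y run ih =>
    intro rest hy
    rw [hy y (by simp), List.cons_append, show cnt5 o c (c :: (run ++ rest)) = ind5 o c (c :: (run ++ rest)) + cnt5 o c (run ++ rest) from rfl,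
      ind5_head_ne _ _ _ _ hco, ih rest (fun z hz => hy z (by simp [hz]))]
    ring
lemma cnt6_peel (o c : Int) (hco : c ≠ o) :
    ∀ run rest : List Int, (∀ y ∈ run, y = c) → cnt6 o c (run ++ rest) = cnt6 o c rest := by
  intro run
  induction run with
  | nil => simp
  | cons y run ih =>
    intro rest hy
    rw [hy y (by simp), List.cons_append, show cnt6 o c (c :: (run ++ rest)) = ind6 o c (c :: (run ++ rest)) + cnt6 o c (run ++ rest) from rfl,
      ind6_head_ne _ _ _ _ hco, ih rest (fun z hz => hy z (by simp [hz]))]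
    ring

-- indicator of the window starting one cell before the run, in terms of the run's length
lemma ind4_ext (o c v : Int) (hco : c ≠ o) (run rest : List Int)
    (hrun : ∀ y ∈ run, y = c) (hrest : ∀ r, rest.head? = some r → r ≠ c) :
    ind4 o c (v :: c :: (run ++ rest)) =
      if (v = o ∧ rest.head? = some o) ∧ run.length = 1 then 1 else 0 := by
  rcases run with _ | ⟨r1, _ | ⟨r2, run⟩⟩
  · rcases rest with _ | ⟨s0, _ | ⟨s1, rest⟩⟩ <;> simp_all [ind4]
  · rw [hrun r1 (by simp)]
    rcases rest with _ | ⟨s0, rest⟩ <;> simp_all [ind4, and_comm]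
  · rw [hrun r1 (by simp), hrun r2 (by simp)]
    simp_all [ind4]

lemma ind5_ext (o c v : Int) (hco : c ≠ o) (run rest : List Int)
    (hrun : ∀ y ∈ run, y = c) (hrest : ∀ r, rest.head? = some r → r ≠ c) :
    ind5 o c (v :: c :: (run ++ rest)) =
      if (v = o ∧ rest.head? = some o) ∧ run.length = 2 then 1 else 0 := by
  rcases run with _ | ⟨r1, _ | ⟨r2, _ | ⟨r3, run⟩⟩⟩
  · rcases rest with _ | ⟨s0, _ | ⟨s1, _ | ⟨s2, rest⟩⟩⟩ <;> simp_all [ind5]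
  · rw [hrun r1 (by simp)]
    rcases rest with _ | ⟨s0, _ | ⟨s1, rest⟩⟩ <;> simp_all [ind5]
  · rw [hrun r1 (by simp), hrun r2 (by simp)]
    rcases rest with _ | ⟨s0, rest⟩ <;> simp_all [ind5, and_comm]
  · rw [hrun r1 (by simp), hrun r2 (by simp), hrun r3 (by simp)]
    simp_all [ind5]

lemma ind6_ext (o c v : Int) (hco : c ≠ o) (run rest : List Int)
    (hrun : ∀ y ∈ run, y = c) (hrest : ∀ r, rest.head? = some r → r ≠ c) :
    ind6 o c (v :: c :: (run ++ rest)) =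
      if (v = o ∧ rest.head? = some o) ∧ run.length = 3 then 1 else 0 := by
  rcases run with _ | ⟨r1, _ | ⟨r2, _ | ⟨r3, _ | ⟨r4, run⟩⟩⟩⟩
  · rcases rest with _ | ⟨s0, _ | ⟨s1, _ | ⟨s2, _ | ⟨s3, rest⟩⟩⟩⟩ <;> simp_all [ind6]
  · rw [hrun r1 (by simp)]
    rcases rest with _ | ⟨s0, _ | ⟨s1, _ | ⟨s2, rest⟩⟩⟩ <;> simp_all [ind6]
  · rw [hrun r1 (by simp), hrun r2 (by simp)]
    rcases rest with _ | ⟨s0, _ | ⟨s1, rest⟩⟩ <;> simp_all [ind6]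
  · rw [hrun r1 (by simp), hrun r2 (by simp), hrun r3 (by simp)]
    rcases rest with _ | ⟨s0, rest⟩ <;> simp_all [ind6, and_comm]
  · rw [hrun r1 (by simp), hrun r2 (by simp), hrun r3 (by simp), hrun r4 (by simp)]
    simp_all [ind6]

lemma goRuns_eq (c o : Int) (hco : c ≠ o) :
    ∀ (n : Nat) (l : List Int), l.length ≤ n → ∀ prev : Option Int,
      goRuns c o prev l =
        (cnt5 o c (pext prev l), cnt4 o c (pext prev l) + cnt6 o c (pext prev l)) := by
  intro n
  induction n with
  | zero =>
    intro l hl prev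
    have : l = [] := List.eq_nil_of_length_eq_zero (Nat.le_zero.mp hl)
    subst this
    cases prev <;> simp [goRuns, pext, cnt4, cnt5, cnt6, ind4, ind5, ind6]
  | succ n ih =>
    intro l hl prev
    rcases l with _ | ⟨x, xs⟩
    · cases prev <;> simp [goRuns, pext, cnt4, cnt5, cnt6, ind4, ind5, ind6]
    · have hxsn : xs.length ≤ n := by simp at hl; omega
      by_cases hx : x = c
      · rw [hx]
        have hrestlen : (xs.dropWhile (· = c)).length ≤ n :=
          le_trans (List.length_dropWhile_le _ xs) hxsn
        have hIH := ih (xs.dropWhile (· = c)) hrestlen (some c)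
        simp only [pext] at hIH
        have hrun : ∀ y ∈ xs.takeWhile (· = c), y = c := fun y hy => by
          simpa using List.mem_takeWhile_imp hy
        have hrest : ∀ r, (xs.dropWhile (· = c)).head? = some r → r ≠ c := fun r hr => by
          simpa using head?_dropWhile_false _ xs r hr
        have hxs : xs.takeWhile (· = c) ++ xs.dropWhile (· = c) = xs :=
          List.takeWhile_append_dropWhile
        rw [show goRuns c o prev (c :: xs) =
            ((if (prev = some o ∧ (xs.dropWhile (· = c)).head? = some o) ∧
                  (1 + ((xs.takeWhile (· = c)).length : Int)) = 3
              then (goRuns c o (some c) (xs.dropWhile (· = c))).1 + 1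
              else (goRuns c o (some c) (xs.dropWhile (· = c))).1),
             (if (prev = some o ∧ (xs.dropWhile (· = c)).head? = some o) ∧
                  ((1 + ((xs.takeWhile (· = c)).length : Int)) = 2 ∨
                   (1 + ((xs.takeWhile (· = c)).length : Int)) = 4)
              then (goRuns c o (some c) (xs.dropWhile (· = c))).2 + 1
              else (goRuns c o (some c) (xs.dropWhile (· = c))).2)) from by
          rw [goRuns]; simp]
        rw [hIH]
        have h5 : cnt5 o c (c :: xs.dropWhile (· = c)) = cnt5 o c (xs.dropWhile (· = c)) := by
          rw [show cnt5 o c (c :: xs.dropWhile (· = c)) = ind5 o c (c :: xs.dropWhile (· = c)) + cnt5 o c (xs.dropWhile (· = c)) from rfl,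
            ind5_head_ne _ _ _ _ hco]; ring
        have h4 : cnt4 o c (c :: xs.dropWhile (· = c)) = cnt4 o c (xs.dropWhile (· = c)) := by
          rw [show cnt4 o c (c :: xs.dropWhile (· = c)) = ind4 o c (c :: xs.dropWhile (· = c)) + cnt4 o c (xs.dropWhile (· = c)) from rfl,
            ind4_head_ne _ _ _ _ hco]; ring
        have h6 : cnt6 o c (c :: xs.dropWhile (· = c)) = cnt6 o c (xs.dropWhile (· = c)) := by
          rw [show cnt6 o c (c :: xs.dropWhile (· = c)) = ind6 o c (c :: xs.dropWhile (· = c)) + cnt6 o c (xs.dropWhile (· = c)) from rfl,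
            ind6_head_ne _ _ _ _ hco]; ring
        rw [h5, h4, h6]
        cases prev with
        | none =>
          have hpe : pext none (c :: xs) = (c :: xs.takeWhile (· = c)) ++ xs.dropWhile (· = c) := by
            simp [pext, hxs]
          rw [hpe, cnt4_peel o c hco _ _ (by intro y hy; rcases List.mem_cons.mp hy with h | h; exact h; exact hrun y h),
            cnt5_peel o c hco _ _ (by intro y hy; rcases List.mem_cons.mp hy with h | h; exact h; exact hrun y h),
            cnt6_peel o c hco _ _ (by intro y hy; rcases List.mem_cons.mp hy with h | h; exact h; exact hrun y h)]
          simp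
        | some v =>
          have hpe : pext (some v) (c :: xs) = v :: c :: (xs.takeWhile (· = c) ++ xs.dropWhile (· = c)) := by
            simp [pext, hxs]
          rw [hpe]
          rw [show cnt5 o c (v :: c :: (xs.takeWhile (· = c) ++ xs.dropWhile (· = c))) =
              ind5 o c (v :: c :: (xs.takeWhile (· = c) ++ xs.dropWhile (· = c))) +
              cnt5 o c (c :: (xs.takeWhile (· = c) ++ xs.dropWhile (· = c))) from rfl,
            show cnt4 o c (v :: c :: (xs.takeWhile (· = c) ++ xs.dropWhile (· = c))) =
              ind4 o c (v :: c :: (xs.takeWhile (· = c) ++ xs.dropWhile (· = c))) +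
              cnt4 o c (c :: (xs.takeWhile (· = c) ++ xs.dropWhile (· = c))) from rfl,
            show cnt6 o c (v :: c :: (xs.takeWhile (· = c) ++ xs.dropWhile (· = c))) =
              ind6 o c (v :: c :: (xs.takeWhile (· = c) ++ xs.dropWhile (· = c))) +
              cnt6 o c (c :: (xs.takeWhile (· = c) ++ xs.dropWhile (· = c))) from rfl,
            ind4_ext o c v hco _ _ hrun hrest, ind5_ext o c v hco _ _ hrun hrest,
            ind6_ext o c v hco _ _ hrun hrest,
            show (c :: (xs.takeWhile (· = c) ++ xs.dropWhile (· = c))) =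
              ((c :: xs.takeWhile (· = c)) ++ xs.dropWhile (· = c)) from rfl,
            cnt4_peel o c hco _ _ (by intro y hy; rcases List.mem_cons.mp hy with h | h; exact h; exact hrun y h),
            cnt5_peel o c hco _ _ (by intro y hy; rcases List.mem_cons.mp hy with h | h; exact h; exact hrun y h),
            cnt6_peel o c hco _ _ (by intro y hy; rcases List.mem_cons.mp hy with h | h; exact h; exact hrun y h)]
          rw [Prod.mk.injEq]
          constructor <;> split_ifs <;> simp_all <;> omega
      · rw [show goRuns c o prev (x :: xs) = goRuns c o (some x) xs from by rw [goRuns]; simp [hx]]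
        rw [ih xs hxsn (some x)]
        cases prev with
        | none => simp [pext]
        | some v =>
          rw [show pext (some v) (x :: xs) = v :: x :: xs from rfl, show pext (some x) xs = x :: xs from rfl,
            show cnt5 o c (v :: x :: xs) = ind5 o c (v :: x :: xs) + cnt5 o c (x :: xs) from rfl,
            show cnt4 o c (v :: x :: xs) = ind4 o c (v :: x :: xs) + cnt4 o c (x :: xs) from rfl,
            show cnt6 o c (v :: x :: xs) = ind6 o c (v :: x :: xs) + cnt6 o c (x :: xs) from rfl,
            ind4_snd_ne _ _ _ _ _ hx, ind5_snd_ne _ _ _ _ _ hx, ind6_snd_ne _ _ _ _ _ hx]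
          simp

lemma pyGetD_cons_succ' (x : Int) (xs : List Int) (j : Int) (h : 0 ≤ j) (d : Int) :
    PySem.List.pyGetD (x :: xs) (j + 1) d = PySem.List.pyGetD xs j d := by
  obtain ⟨k, rfl⟩ := Int.eq_ofNat_of_zero_le h
  rw [show ((k : Int) + 1) = ((k + 1 : Nat) : Int) by push_cast; ring,
    PySem.List.pyGetD_natCast, PySem.List.pyGetD_natCast, List.getD_cons_succ]

lemma pyGetD_cons_shift (x : Int) (xs : List Int) (k : Nat) (i : Int) (hi : 0 ≤ i) (d : Int) :
    PySem.List.pyGetD (x :: xs) (1 + (k : Int) + i) d = PySem.List.pyGetD xs ((k : Int) + i) d := by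
  rw [show (1 : Int) + (k : Int) + i = ((k : Int) + i) + 1 by ring,
    pyGetD_cons_succ' _ _ _ (by omega)]

lemma countP_shift (p q : Int → Bool) (B : Int)
    (h : ∀ k : Nat, p (1 + (k : Int)) = q ((k : Int))) :
    (PySem.List.pyRange 1 B 1).countP p = (PySem.List.pyRange 0 (B - 1) 1).countP q := by
  rw [PySem.List.pyRange_one, PySem.List.pyRange_one, List.countP_map, List.countP_map]
  simp only [Int.sub_zero]
  congr 1
  funext k
  simpa using h k

lemma cntP4 (o c : Int) : ∀ l : List Int,
    ((PySem.List.pyRange 0 ((l.length : Int) - 3) 1).countP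
      (fun j => decide (PySem.List.pyGetD l (j) 0 = o ∧
        PySem.List.pyGetD l (j+1) 0 = c ∧
        PySem.List.pyGetD l (j+2) 0 = c ∧
        PySem.List.pyGetD l (j+3) 0 = o)) : Int) = cnt4 o c l := by
  intro l
  induction l with
  | nil => rw [PySem.List.pyRange_one_eq_nil (by simp)]; simp [cnt4]
  | cons x xs ih =>
    rcases xs with _ | ⟨a, _ | ⟨b, _ | ⟨e, t⟩⟩⟩
    · rw [PySem.List.pyRange_one_eq_nil (by simp)]; simp [cnt4, ind4]
    · rw [PySem.List.pyRange_one_eq_nil (by simp)]; simp [cnt4, ind4]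
    · rw [PySem.List.pyRange_one_eq_nil (by simp)]; simp [cnt4, ind4]
    · have hB : (0 : Int) < ((x :: a :: b :: e :: t).length : Int) - 3 := by simp; omega
      rw [PySem.List.pyRange_one_cons hB, List.countP_cons]
      have hk : ∀ k : Nat,
          decide (PySem.List.pyGetD (x :: a :: b :: e :: t) (1 + (k : Int)) 0 = o ∧
            PySem.List.pyGetD (x :: a :: b :: e :: t) (1 + (k : Int)+1) 0 = c ∧
            PySem.List.pyGetD (x :: a :: b :: e :: t) (1 + (k : Int)+2) 0 = c ∧
            PySem.List.pyGetD (x :: a :: b :: e :: t) (1 + (k : Int)+3) 0 = o)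
          = decide (PySem.List.pyGetD (a :: b :: e :: t) ((k : Int)) 0 = o ∧
            PySem.List.pyGetD (a :: b :: e :: t) ((k : Int)+1) 0 = c ∧
            PySem.List.pyGetD (a :: b :: e :: t) ((k : Int)+2) 0 = c ∧
            PySem.List.pyGetD (a :: b :: e :: t) ((k : Int)+3) 0 = o) := by
        intro k
        rw [pyGetD_cons_shift _ _ _ 1 (by omega), pyGetD_cons_shift _ _ _ 2 (by omega), pyGetD_cons_shift _ _ _ 3 (by omega),
          show (1 : Int) + (k : Int) = (k : Int) + 1 from add_comm _ _,
          pyGetD_cons_succ' _ _ _ (by omega)]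
      rw [show (0 : Int) + 1 = 1 by norm_num,
        countP_shift _ (fun j => decide (PySem.List.pyGetD (a :: b :: e :: t) (j) 0 = o ∧
            PySem.List.pyGetD (a :: b :: e :: t) (j+1) 0 = c ∧
            PySem.List.pyGetD (a :: b :: e :: t) (j+2) 0 = c ∧
            PySem.List.pyGetD (a :: b :: e :: t) (j+3) 0 = o)) _ hk]
      rw [show ((x :: a :: b :: e :: t).length : Int) - 3 - 1 = ((a :: b :: e :: t).length : Int) - 3 by simp; omega]
      push_cast
      rw [ih]
      simp only [cnt4, ind4, pysem, decide_eq_true_eq]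
      split_ifs <;> simp_all <;> omega

lemma cntP5 (o c : Int) : ∀ l : List Int,
    ((PySem.List.pyRange 0 ((l.length : Int) - 4) 1).countP
      (fun j => decide (PySem.List.pyGetD l (j) 0 = o ∧
        PySem.List.pyGetD l (j+1) 0 = c ∧
        PySem.List.pyGetD l (j+2) 0 = c ∧
        PySem.List.pyGetD l (j+3) 0 = c ∧
        PySem.List.pyGetD l (j+4) 0 = o)) : Int) = cnt5 o c l := by
  intro l
  induction l with
  | nil => rw [PySem.List.pyRange_one_eq_nil (by simp)]; simp [cnt5]
  | cons x xs ih =>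
    rcases xs with _ | ⟨a, _ | ⟨b, _ | ⟨e, _ | ⟨f, t⟩⟩⟩⟩
    · rw [PySem.List.pyRange_one_eq_nil (by simp)]; simp [cnt5, ind5]
    · rw [PySem.List.pyRange_one_eq_nil (by simp)]; simp [cnt5, ind5]
    · rw [PySem.List.pyRange_one_eq_nil (by simp)]; simp [cnt5, ind5]
    · rw [PySem.List.pyRange_one_eq_nil (by simp)]; simp [cnt5, ind5]
    · have hB : (0 : Int) < ((x :: a :: b :: e :: f :: t).length : Int) - 4 := by simp; omega
      rw [PySem.List.pyRange_one_cons hB, List.countP_cons]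
      have hk : ∀ k : Nat,
          decide (PySem.List.pyGetD (x :: a :: b :: e :: f :: t) (1 + (k : Int)) 0 = o ∧
            PySem.List.pyGetD (x :: a :: b :: e :: f :: t) (1 + (k : Int)+1) 0 = c ∧
            PySem.List.pyGetD (x :: a :: b :: e :: f :: t) (1 + (k : Int)+2) 0 = c ∧
            PySem.List.pyGetD (x :: a :: b :: e :: f :: t) (1 + (k : Int)+3) 0 = c ∧
            PySem.List.pyGetD (x :: a :: b :: e :: f :: t) (1 + (k : Int)+4) 0 = o)
          = decide (PySem.List.pyGetD (a :: b :: e :: f :: t) ((k : Int)) 0 = o ∧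
            PySem.List.pyGetD (a :: b :: e :: f :: t) ((k : Int)+1) 0 = c ∧
            PySem.List.pyGetD (a :: b :: e :: f :: t) ((k : Int)+2) 0 = c ∧
            PySem.List.pyGetD (a :: b :: e :: f :: t) ((k : Int)+3) 0 = c ∧
            PySem.List.pyGetD (a :: b :: e :: f :: t) ((k : Int)+4) 0 = o) := by
        intro k
        rw [pyGetD_cons_shift _ _ _ 1 (by omega), pyGetD_cons_shift _ _ _ 2 (by omega), pyGetD_cons_shift _ _ _ 3 (by omega), pyGetD_cons_shift _ _ _ 4 (by omega),
          show (1 : Int) + (k : Int) = (k : Int) + 1 from add_comm _ _,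
          pyGetD_cons_succ' _ _ _ (by omega)]
      rw [show (0 : Int) + 1 = 1 by norm_num,
        countP_shift _ (fun j => decide (PySem.List.pyGetD (a :: b :: e :: f :: t) (j) 0 = o ∧
            PySem.List.pyGetD (a :: b :: e :: f :: t) (j+1) 0 = c ∧
            PySem.List.pyGetD (a :: b :: e :: f :: t) (j+2) 0 = c ∧
            PySem.List.pyGetD (a :: b :: e :: f :: t) (j+3) 0 = c ∧
            PySem.List.pyGetD (a :: b :: e :: f :: t) (j+4) 0 = o)) _ hk]
      rw [show ((x :: a :: b :: e :: f :: t).length : Int) - 4 - 1 = ((a :: b :: e :: f :: t).length : Int) - 4 by simp; omega]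
      push_cast
      rw [ih]
      simp only [cnt5, ind5, pysem, decide_eq_true_eq]
      split_ifs <;> simp_all <;> omega

lemma cntP6 (o c : Int) : ∀ l : List Int,
    ((PySem.List.pyRange 0 ((l.length : Int) - 5) 1).countP
      (fun j => decide (PySem.List.pyGetD l (j) 0 = o ∧
        PySem.List.pyGetD l (j+1) 0 = c ∧
        PySem.List.pyGetD l (j+2) 0 = c ∧
        PySem.List.pyGetD l (j+3) 0 = c ∧
        PySem.List.pyGetD l (j+4) 0 = c ∧
        PySem.List.pyGetD l (j+5) 0 = o)) : Int) = cnt6 o c l := by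
  intro l
  induction l with
  | nil => rw [PySem.List.pyRange_one_eq_nil (by simp)]; simp [cnt6]
  | cons x xs ih =>
    rcases xs with _ | ⟨a, _ | ⟨b, _ | ⟨e, _ | ⟨f, _ | ⟨g, t⟩⟩⟩⟩⟩
    · rw [PySem.List.pyRange_one_eq_nil (by simp)]; simp [cnt6, ind6]
    · rw [PySem.List.pyRange_one_eq_nil (by simp)]; simp [cnt6, ind6]
    · rw [PySem.List.pyRange_one_eq_nil (by simp)]; simp [cnt6, ind6]
    · rw [PySem.List.pyRange_one_eq_nil (by simp)]; simp [cnt6, ind6]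
    · rw [PySem.List.pyRange_one_eq_nil (by simp)]; simp [cnt6, ind6]
    · have hB : (0 : Int) < ((x :: a :: b :: e :: f :: g :: t).length : Int) - 5 := by simp; omega
      rw [PySem.List.pyRange_one_cons hB, List.countP_cons]
      have hk : ∀ k : Nat,
          decide (PySem.List.pyGetD (x :: a :: b :: e :: f :: g :: t) (1 + (k : Int)) 0 = o ∧
            PySem.List.pyGetD (x :: a :: b :: e :: f :: g :: t) (1 + (k : Int)+1) 0 = c ∧
            PySem.List.pyGetD (x :: a :: b :: e :: f :: g :: t) (1 + (k : Int)+2) 0 = c ∧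
            PySem.List.pyGetD (x :: a :: b :: e :: f :: g :: t) (1 + (k : Int)+3) 0 = c ∧
            PySem.List.pyGetD (x :: a :: b :: e :: f :: g :: t) (1 + (k : Int)+4) 0 = c ∧
            PySem.List.pyGetD (x :: a :: b :: e :: f :: g :: t) (1 + (k : Int)+5) 0 = o)
          = decide (PySem.List.pyGetD (a :: b :: e :: f :: g :: t) ((k : Int)) 0 = o ∧
            PySem.List.pyGetD (a :: b :: e :: f :: g :: t) ((k : Int)+1) 0 = c ∧
            PySem.List.pyGetD (a :: b :: e :: f :: g :: t) ((k : Int)+2) 0 = c ∧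
            PySem.List.pyGetD (a :: b :: e :: f :: g :: t) ((k : Int)+3) 0 = c ∧
            PySem.List.pyGetD (a :: b :: e :: f :: g :: t) ((k : Int)+4) 0 = c ∧
            PySem.List.pyGetD (a :: b :: e :: f :: g :: t) ((k : Int)+5) 0 = o) := by
        intro k
        rw [pyGetD_cons_shift _ _ _ 1 (by omega), pyGetD_cons_shift _ _ _ 2 (by omega), pyGetD_cons_shift _ _ _ 3 (by omega), pyGetD_cons_shift _ _ _ 4 (by omega), pyGetD_cons_shift _ _ _ 5 (by omega),
          show (1 : Int) + (k : Int) = (k : Int) + 1 from add_comm _ _,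
          pyGetD_cons_succ' _ _ _ (by omega)]
      rw [show (0 : Int) + 1 = 1 by norm_num,
        countP_shift _ (fun j => decide (PySem.List.pyGetD (a :: b :: e :: f :: g :: t) (j) 0 = o ∧
            PySem.List.pyGetD (a :: b :: e :: f :: g :: t) (j+1) 0 = c ∧
            PySem.List.pyGetD (a :: b :: e :: f :: g :: t) (j+2) 0 = c ∧
            PySem.List.pyGetD (a :: b :: e :: f :: g :: t) (j+3) 0 = c ∧
            PySem.List.pyGetD (a :: b :: e :: f :: g :: t) (j+4) 0 = c ∧
            PySem.List.pyGetD (a :: b :: e :: f :: g :: t) (j+5) 0 = o)) _ hk]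
      rw [show ((x :: a :: b :: e :: f :: g :: t).length : Int) - 5 - 1 = ((a :: b :: e :: f :: g :: t).length : Int) - 5 by simp; omega]
      push_cast
      rw [ih]
      simp only [cnt6, ind6, pysem, decide_eq_true_eq]
      split_ifs <;> simp_all <;> omega


lemma main_equal (array : List Int) (color : Int) (h : color ≠ 0) :
    get_death array color = get_death_alt array color := by
  have hrw : color * -1 = -color := by ring
  have hco : color ≠ -color := by omega
  have hA : get_death array color =
      (0, cnt5 (-color) color array, cnt4 (-color) color array + cnt6 (-color) color array) := by
    simp only [get_death, hrw]
    rw [PySem.List.foldl_ite_add_one, PySem.List.foldl_ite_add_one, PySem.List.foldl_ite_add_one,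
      cntP4, cntP5, cntP6]
    norm_num
  have hB : get_death_alt array color =
      (0, cnt5 (-color) color array, cnt4 (-color) color array + cnt6 (-color) color array) := by
    simp only [get_death_alt]
    rw [goRuns_eq color (-color) hco array.length array le_rfl none]
    simp [pext]
  rw [hA, hB]

-- ===== VERDICT (by name: the statement is the Claim_ definition above) =====
theorem get_death_spec : Claim_equal_get_death := by
  intro array color _hDom hPre
  unfold Pre_get_death at hPre
  unfold Spec_get_death
  exact main_equal array color hPre
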